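-- pv_equiv track=rewrite | github.com/dmjohnsson23/micdrop | micdrop/pipeline/merge.py | n_way_last
-- ===== SOURCE A (Python) =====
-- from typing import Sequence, Callable, Mapping, Any
--
-- def n_way_last(values:Sequence):
--     """
--     Assumes the first value is the original, and all others are variants. Return the last
--     variant value that is not equal to the original value. If all values are equal to the
--     original, return the original.
--     """
--     if not values:
--         return None
--     original = values[0]
--     variants = values[1:]
--     for variant in reversed(variants):
--         if variant != original:
--             return variant
--     return original
-- ===== SOURCE B (Python) =====
-- def n_way_last(values):
--     if not values:
--         return None
--     original = values[0]
--     result = original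
--     for variant in values[1:]:
--         if variant != original:
--             result = variant
--     return result
-- ===== Notes on version B (the rewrite author's own statement) =====
-- stated objective: alternative
-- what changed: Replaced A's reversed scan with early return by a single forward accumulator pass that keeps the last variant differing from the original, with no early exit.
import Mathlib
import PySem

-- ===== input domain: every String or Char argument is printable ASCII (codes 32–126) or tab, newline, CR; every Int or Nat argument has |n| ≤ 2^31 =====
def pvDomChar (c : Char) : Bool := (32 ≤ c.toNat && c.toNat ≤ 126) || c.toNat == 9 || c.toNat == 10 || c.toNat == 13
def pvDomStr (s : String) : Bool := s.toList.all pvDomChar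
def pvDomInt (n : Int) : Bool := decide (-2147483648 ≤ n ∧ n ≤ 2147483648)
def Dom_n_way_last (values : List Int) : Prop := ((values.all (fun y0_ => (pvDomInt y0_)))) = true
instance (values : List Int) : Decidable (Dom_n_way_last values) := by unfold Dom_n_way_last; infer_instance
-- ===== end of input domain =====

-- ===== PORT A =====
-- reverse scan with early exit: first variant (from the right) not equal to original
def nWayLastAux (original : Int) : List Int → Int
  | [] => original
  | v :: rest => if v ≠ original then v else nWayLastAux original rest

def n_way_last (values : List Int) : Option Int :=
  match values with
  | [] => none
  | original :: variants => some (nWayLastAux original variants.reverse)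

-- ===== PORT B =====
-- B: single forward accumulator pass, no early exit
def n_way_last_alt (values : List Int) : Option Int :=
  match values with
  | [] => none
  | original :: variants =>
      some (variants.foldl (fun result v => if v ≠ original then v else result) original)

-- ===== PRECONDITION & SPEC =====
def Spec_n_way_last (values : List Int) (out : Option Int) : Prop := out = n_way_last_alt values
instance (values : List Int) (out : Option Int) : Decidable (Spec_n_way_last values out) := by unfold Spec_n_way_last; infer_instance

-- ===== CLAIM (what is proved, stated in full; the proofs are below) =====
def Claim_equal_n_way_last : Prop := ∀ (values : List Int), Dom_n_way_last values → Spec_n_way_last values (n_way_last values)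

-- ===== LEMMAS AND PROOFS =====

-- ===== VERDICT (by name: the statement is the Claim_ definition above) =====
theorem aux_eq_foldl (original : Int) (l : List Int) :
    nWayLastAux original l.reverse =
      l.foldl (fun result v => if v ≠ original then v else result) original := by
  induction l using List.reverseRecOn with
  | nil => rfl
  | append_singleton l x ih =>
      simp [List.foldl_append, nWayLastAux]
      split <;> simp_all

theorem n_way_last_spec : Claim_equal_n_way_last := by
  intro values _
  unfold Spec_n_way_last n_way_last n_way_last_alt
  cases values with
  | nil => rfl
  | cons o vs => simp [aux_eq_foldl]
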